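-- pv_equiv track=rewrite | github.com/Skyresth/outexplain | outexplain/utils.py | _guess_emulator_from_process_chain
-- ===== SOURCE A (Python) =====
-- def _guess_emulator_from_process_chain(chain: list[str]) -> str | None:
--     low = [n.lower() for n in chain]
--     candidates = ["windowsterminal", "wezterm", "iterm2", "alacritty",
--                   "hyper", "kitty", "gnome-terminal", "konsole", "xterm",
--                   "terminator", "tilix", "tmux", "screen", "conhost",
--                   "powershell", "pwsh", "cmd", "code"]
--     for cand in candidates:
--         for n in low:
--             if cand in n:
--                 return cand
--     return None
-- ===== SOURCE B (Python) =====
-- def _guess_emulator_from_process_chain(chain: list[str]) -> str | None: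
--     candidates = ["windowsterminal", "wezterm", "iterm2", "alacritty",
--                   "hyper", "kitty", "gnome-terminal", "konsole", "xterm",
--                   "terminator", "tilix", "tmux", "screen", "conhost",
--                   "powershell", "pwsh", "cmd", "code"]
--     # phase 1: index — which candidates occur anywhere in the chain
--     present = set()
--     for n in chain:
--         name = n.lower()
--         for cand in candidates:
--             if cand in name:
--                 present.add(cand)
--     # phase 2: select — first candidate in priority order that is present
--     for cand in candidates:
--         if cand in present:
--             return cand
--     return None
-- ===== Notes on version B (the rewrite author's own statement) =====
-- stated objective: alternative
-- what changed: B replaces A's short-circuiting priority scan (candidates outer, names inner, return on first hit) by a two-phase index-then-select decomposition: one pass over the chain builds the set of candidates present as substrings, then the fixed priority list is scanned once against that set.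
import Mathlib
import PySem

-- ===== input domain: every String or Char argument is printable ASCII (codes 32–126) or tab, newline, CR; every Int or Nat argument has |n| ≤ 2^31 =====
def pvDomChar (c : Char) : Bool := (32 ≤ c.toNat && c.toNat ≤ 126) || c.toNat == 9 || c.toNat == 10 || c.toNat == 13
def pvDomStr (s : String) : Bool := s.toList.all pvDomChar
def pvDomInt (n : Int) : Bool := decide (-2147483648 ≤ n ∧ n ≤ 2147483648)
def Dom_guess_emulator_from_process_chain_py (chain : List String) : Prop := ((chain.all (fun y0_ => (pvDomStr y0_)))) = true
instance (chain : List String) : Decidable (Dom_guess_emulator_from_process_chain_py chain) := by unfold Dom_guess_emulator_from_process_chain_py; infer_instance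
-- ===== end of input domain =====

-- B replaces A's short-circuiting priority scan by a two-phase index-then-select decomposition
-- (build the set of present candidates in one pass over the chain, then scan the priority list once).

-- the fixed candidate list, shared verbatim by both Pythons
def pvCands : List String :=
  ["windowsterminal", "wezterm", "iterm2", "alacritty",
   "hyper", "kitty", "gnome-terminal", "konsole", "xterm",
   "terminator", "tilix", "tmux", "screen", "conhost",
   "powershell", "pwsh", "cmd", "code"]

-- ===== PORT A =====
-- inner loop: 'for n in low: if cand in n: return cand'
def pvInnerA (c : String) : List String → Option String
  | [] => none
  | n :: t => if PySem.Str.isIn c n then some c else pvInnerA c t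

-- outer loop: 'for cand in candidates: …'
def pvOuterA (low : List String) : List String → Option String
  | [] => none
  | c :: cs =>
    match pvInnerA c low with
    | some r => some r
    | none => pvOuterA low cs

def guess_emulator_from_process_chain_py (chain : List String) : Option String :=
  pvOuterA (chain.map PySem.Str.lower) pvCands

-- ===== PORT B =====
-- phase 2: 'for cand in candidates: if cand in present: return cand'
def pvSelectB (present : PySem.Set String) : List String → Option String
  | [] => none
  | c :: cs => if PySem.Set.contains present c then some c else pvSelectB present cs

def guess_emulator_from_process_chain_py_alt (chain : List String) : Option String :=
  -- phase 1: build the set of matched candidates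
  let present : PySem.Set String :=
    chain.foldl (fun acc n =>
      let name := PySem.Str.lower n
      pvCands.foldl (fun acc c => if PySem.Str.isIn c name then PySem.Set.add acc c else acc) acc)
      PySem.Set.empty
  pvSelectB present pvCands

-- ===== PRECONDITION & SPEC =====
def Spec_guess_emulator_from_process_chain_py (chain : List String) (out : Option String) : Prop := out = guess_emulator_from_process_chain_py_alt chain
instance (chain : List String) (out : Option String) : Decidable (Spec_guess_emulator_from_process_chain_py chain out) := by unfold Spec_guess_emulator_from_process_chain_py; infer_instance

-- ===== CLAIM (what is proved, stated in full; the proofs are below) =====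
def Claim_equal_guess_emulator_from_process_chain_py : Prop := ∀ (chain : List String), Dom_guess_emulator_from_process_chain_py chain → Spec_guess_emulator_from_process_chain_py chain (guess_emulator_from_process_chain_py chain)

-- ===== LEMMAS AND PROOFS =====

-- A's inner loop returns 'some c' iff some name contains c
theorem pvInnerA_eq (c : String) (low : List String) :
    pvInnerA c low = if low.any (fun n => PySem.Str.isIn c n) then some c else none := by
  induction low with
  | nil => simp [pvInnerA]
  | cons n t ih =>
    rw [pvInnerA, ih, List.any_cons]
    by_cases h : PySem.Str.isIn c n = true
    · rw [if_pos h, h, Bool.true_or, if_pos rfl]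
    · rw [if_neg h]
      simp only [Bool.not_eq_true] at h
      rw [h, Bool.false_or]

-- membership in one inner indexing pass of B
theorem pvMemInner (name : String) (x : String) (cands : List String) (acc : PySem.Set String) :
    (x ∈ cands.foldl (fun acc c => if PySem.Str.isIn c name then PySem.Set.add acc c else acc) acc)
      ↔ x ∈ acc ∨ (x ∈ cands ∧ PySem.Str.isIn x name = true) := by
  induction cands generalizing acc with
  | nil => simp
  | cons c cs ih =>
    rw [List.foldl_cons]
    by_cases h : PySem.Str.isIn c name = true
    · rw [if_pos h, ih]
      simp only [PySem.Set.mem_add, List.mem_cons]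
      constructor
      · rintro (⟨hx | rfl⟩ | ⟨hm, hi⟩)
        · exact Or.inl hx
        · exact Or.inr ⟨Or.inl rfl, h⟩
        · exact Or.inr ⟨Or.inr hm, hi⟩
      · rintro (hx | ⟨(rfl | hm), hi⟩)
        · exact Or.inl (Or.inl hx)
        · exact Or.inl (Or.inr rfl)
        · exact Or.inr ⟨hm, hi⟩
    · rw [if_neg h, ih]
      simp only [List.mem_cons]
      constructor
      · rintro (hx | ⟨hm, hi⟩)
        · exact Or.inl hx
        · exact Or.inr ⟨Or.inr hm, hi⟩
      · rintro (hx | ⟨(rfl | hm), hi⟩)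
        · exact Or.inl hx
        · exact absurd hi h
        · exact Or.inr ⟨hm, hi⟩

-- membership in B's full index
theorem pvMemPresent (chain : List String) (x : String) (acc : PySem.Set String) :
    (x ∈ chain.foldl (fun acc n =>
        pvCands.foldl (fun acc c => if PySem.Str.isIn c (PySem.Str.lower n) then PySem.Set.add acc c else acc) acc) acc)
      ↔ x ∈ acc ∨ (x ∈ pvCands ∧ ∃ n ∈ chain, PySem.Str.isIn x (PySem.Str.lower n) = true) := by
  induction chain generalizing acc with
  | nil => simp
  | cons n t ih =>
    rw [List.foldl_cons, ih, pvMemInner]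
    constructor
    · rintro (⟨hx | ⟨hm, hi⟩⟩ | ⟨hm, m, hmem, hi⟩)
      · exact Or.inl hx
      · exact Or.inr ⟨hm, n, by simp, hi⟩
      · exact Or.inr ⟨hm, m, by simp [hmem], hi⟩
    · rintro (hx | ⟨hm, m, hmem, hi⟩)
      · exact Or.inl (Or.inl hx)
      · rcases List.mem_cons.mp hmem with rfl | hmem'
        · exact Or.inl (Or.inr ⟨hm, hi⟩)
        · exact Or.inr ⟨hm, m, hmem', hi⟩

-- the two scans agree on any suffix of the candidate list
theorem pvScan_eq (chain : List String) (cs : List String) (hsub : ∀ c ∈ cs, c ∈ pvCands) :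
    pvOuterA (chain.map PySem.Str.lower) cs
      = pvSelectB (chain.foldl (fun acc n =>
          pvCands.foldl (fun acc c => if PySem.Str.isIn c (PySem.Str.lower n) then PySem.Set.add acc c else acc) acc)
          PySem.Set.empty) cs := by
  induction cs with
  | nil => rfl
  | cons c t ih =>
    have hc : c ∈ pvCands := hsub c (List.mem_cons_self ..)
    have key : (PySem.Set.contains
        (chain.foldl (fun acc n =>
          pvCands.foldl (fun acc c => if PySem.Str.isIn c (PySem.Str.lower n) then PySem.Set.add acc c else acc) acc)
          PySem.Set.empty) c = true)
        ↔ ∃ n ∈ chain, PySem.Str.isIn c (PySem.Str.lower n) = true := by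
      rw [PySem.Set.contains_iff, pvMemPresent]
      simp [hc, PySem.Set.empty]
    have anykey : ((chain.map PySem.Str.lower).any (fun n => PySem.Str.isIn c n) = true)
        ↔ ∃ n ∈ chain, PySem.Str.isIn c (PySem.Str.lower n) = true := by
      simp
    have hpres := Bool.eq_iff_iff.mpr (key.trans anykey.symm)
    simp only [pvOuterA, pvSelectB, pvInnerA_eq, hpres]
    cases h : (chain.map PySem.Str.lower).any (fun n => PySem.Str.isIn c n) with
    | false =>
      simp only [Bool.false_eq_true, if_false]
      exact ih (fun c hcm => hsub c (List.mem_cons_of_mem _ hcm))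
    | true => simp

-- ===== VERDICT (by name: the statement is the Claim_ definition above) =====
theorem guess_emulator_from_process_chain_py_spec : Claim_equal_guess_emulator_from_process_chain_py := by
  intro chain _
  unfold Spec_guess_emulator_from_process_chain_py guess_emulator_from_process_chain_py guess_emulator_from_process_chain_py_alt
  exact pvScan_eq chain pvCands (fun _ h => h)
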